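-- pv_equiv track=rewrite | github.com/behlerbg/RDP-Solutions | Scripts/cannibal_numbers.py | evaluate_queries
-- ===== SOURCE A (Python) =====
-- def evaluate_queries(num_list, queries_list):
--     '''
--     >>> evaluate_queries([3, 3, 3, 2, 2, 2, 1, 1, 1], [4, 5])
--     [3, 3]
--     >>> evaluate_queries([5, 4, 3, 2, 1], [4])
--     [3]
--     '''
--     totals = []
--     num_list.sort(reverse=True)
--
--     for q in queries_list:
--         remain_list = num_list.copy()
--         total = 0
--         for index in range(len(num_list)):
--             num = num_list[index]
--             if num >= q:
--                 total += 1
--             elif len(remain_list) - 1 <= index or remain_list[-1] == num: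
--                 break
--             eaten = 0
--             for needs in range(q - num):
--                 if len(remain_list) - 1 > index and num > remain_list[-1]:
--                     remain_list.pop()
--                     eaten += 1
--                 if eaten + num == q:
--                     total += 1
--
--         totals.append(total)
--
--     return totals
-- ===== SOURCE B (Python) =====
-- def evaluate_queries(num_list, queries_list):
--     num_list.sort(reverse=True)  # same in-place sort as the original
--     n = len(num_list)
--     # last position of each value in the descending order, built once
--     last = {v: i for i, v in enumerate(num_list)}
--     totals = []
--     for q in queries_list:
--         total = 0
--         j = n - 1  # tail pointer: elements 0..j are still uneaten
--         for i in range(n):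
--             num = num_list[i]
--             if num >= q:
--                 total += 1
--                 continue
--             if j <= i or num_list[j] == num:
--                 break
--             need = q - num
--             eaten = min(need, j - last[num])
--             if eaten == need:
--                 total += 1
--             j -= eaten
--         totals.append(total)
--     return totals
-- ===== Notes on version B (the rewrite author's own statement) =====
-- stated objective: faster
-- what changed: A re-runs a counted eating loop of q-num iterations with repeated list pops per element and per query; B sorts once, precomputes each value's last index in a dict, and replaces the whole inner loop by an O(1) arithmetic step (eaten = min(q-num, j-last[num])) on a tail pointer.
import Mathlib
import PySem

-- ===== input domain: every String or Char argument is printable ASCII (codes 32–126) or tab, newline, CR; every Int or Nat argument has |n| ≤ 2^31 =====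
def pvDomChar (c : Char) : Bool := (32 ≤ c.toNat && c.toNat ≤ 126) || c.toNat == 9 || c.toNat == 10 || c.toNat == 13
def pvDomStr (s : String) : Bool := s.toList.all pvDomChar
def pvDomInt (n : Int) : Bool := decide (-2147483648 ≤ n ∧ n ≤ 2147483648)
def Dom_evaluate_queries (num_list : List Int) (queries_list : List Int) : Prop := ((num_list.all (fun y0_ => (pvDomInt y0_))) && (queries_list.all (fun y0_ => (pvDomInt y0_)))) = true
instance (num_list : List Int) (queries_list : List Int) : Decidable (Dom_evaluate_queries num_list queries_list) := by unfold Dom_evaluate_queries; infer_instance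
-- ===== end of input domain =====

-- B replaces A's per-element counted eating loop (range(q-num) with repeated pops) by an O(1)
-- arithmetic step using a precomputed last-occurrence index; like A, it sorts num_list in place
-- (same observable mutation); the equivalence proved is about the return value.


-- ===== PORT A =====
-- inner 'for needs in range(q - num)' loop: counted loop over k = (q-num).toNat iterations,
-- state (remain, eaten, total); remain[-1] is only read under the length guard, so getLastD 0 is exact.
def aEat (num q : Int) (index : Nat) : Nat → List Int × Int × Int → List Int × Int × Int
  | 0, st => st
  | k+1, (remain, eaten, total) =>
    let st :=
      if (remain.length : Int) - 1 > (index : Int) ∧ remain.getLastD 0 < num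
      then (remain.dropLast, eaten + 1) else (remain, eaten)
    let total := if st.2 + num == q then total + 1 else total
    aEat num q index k (st.1, st.2, total)

-- 'for index in range(len(num_list))' with break
def aIdx (ns : List Int) (q : Int) (index : Nat) (remain : List Int) (total : Int) : Int :=
  if h : index < ns.length then
    let num := ns[index]
    if q ≤ num then
      let st := aEat num q index (q - num).toNat (remain, 0, total + 1)
      aIdx ns q (index + 1) st.1 st.2.2
    else if (remain.length : Int) - 1 ≤ (index : Int) ∨ remain.getLastD 0 == num then total
    else
      let st := aEat num q index (q - num).toNat (remain, 0, total)
      aIdx ns q (index + 1) st.1 st.2.2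
  else total
termination_by ns.length - index

def evaluate_queries (num_list : List Int) (queries_list : List Int) : List Int :=
  let s := PySem.List.sorted num_list (fun x => x) true
  queries_list.map (fun q => aIdx s q 0 s 0)

-- ===== PORT B =====
-- last = {v: i for i, v in enumerate(num_list)}  (in Source B the key is always present at lookup; getD 0 is exact there)
def bLast (s : List Int) : PySem.Dict Int Int :=
  (PySem.List.enumerate s 0).foldl (fun d p => d.insert p.2 p.1) PySem.Dict.empty

def bIdx (s : List Int) (q : Int) (last : PySem.Dict Int Int) (i : Nat) (j : Int) (total : Int) : Int :=
  if h : i < s.length then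
    let num := s[i]
    if q ≤ num then bIdx s q last (i + 1) j (total + 1)
    else if j ≤ (i : Int) ∨ PySem.List.pyGetD s j 0 == num then total
    else
      let need := q - num
      let eaten := min need (j - last.getD num 0)
      let total := if eaten == need then total + 1 else total
      bIdx s q last (i + 1) (j - eaten) total
  else total
termination_by s.length - i

def evaluate_queries_alt (num_list : List Int) (queries_list : List Int) : List Int :=
  let s := PySem.List.sorted num_list (fun x => x) true
  let last := bLast s
  queries_list.map (fun q => bIdx s q last 0 ((s.length : Int) - 1) 0)

-- ===== PRECONDITION & SPEC =====
def Spec_evaluate_queries (num_list : List Int) (queries_list : List Int) (out : List Int) : Prop := out = evaluate_queries_alt num_list queries_list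
instance (num_list : List Int) (queries_list : List Int) (out : List Int) : Decidable (Spec_evaluate_queries num_list queries_list out) := by unfold Spec_evaluate_queries; infer_instance

-- ===== CLAIM (what is proved, stated in full; the proofs are below) =====
def Claim_equal_evaluate_queries : Prop := ∀ (num_list : List Int) (queries_list : List Int), Dom_evaluate_queries num_list queries_list → Spec_evaluate_queries num_list queries_list (evaluate_queries num_list queries_list)

-- ===== LEMMAS AND PROOFS =====

-- index of the LAST occurrence of v in s (meaningful when v ∈ s)
def lastIdxOf (v : Int) : List Int → Nat
  | [] => 0
  | _ :: t => if v ∈ t then lastIdxOf v t + 1 else 0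

theorem lastIdxOf_lt_length {v : Int} {s : List Int} (h : v ∈ s) : lastIdxOf v s < s.length := by
  induction s with
  | nil => simp at h
  | cons x t ih =>
    by_cases ht : v ∈ t
    · simp [lastIdxOf, ht, ih ht]
    · simp [lastIdxOf, ht]

theorem getElem_lastIdxOf {v : Int} {s : List Int} (h : v ∈ s) :
    s[lastIdxOf v s]'(lastIdxOf_lt_length h) = v := by
  induction s with
  | nil => simp at h
  | cons x t ih =>
    by_cases ht : v ∈ t
    · simpa [lastIdxOf, ht] using ih ht
    · have hx : v = x := by
        rcases List.mem_cons.mp h with h' | h'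
        · exact h'
        · exact absurd h' ht
      subst hx
      simp [lastIdxOf, ht]

theorem getElem_ne_of_gt_lastIdxOf {v : Int} {s : List Int} {e : Nat}
    (he : e < s.length) (hgt : lastIdxOf v s < e) : s[e] ≠ v := by
  induction s generalizing e with
  | nil => simp at he
  | cons x t ih =>
    obtain ⟨e', rfl⟩ : ∃ e', e = e' + 1 := ⟨e - 1, by omega⟩
    have he' : e' < t.length := by simp at he; omega
    rw [List.getElem_cons_succ]
    by_cases ht : v ∈ t
    · have h1 : lastIdxOf v (x :: t) = lastIdxOf v t + 1 := by simp [lastIdxOf, ht]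
      rw [h1] at hgt
      exact ih he' (by omega)
    · intro hcon
      exact ht (hcon ▸ List.getElem_mem he')

-- the dict comprehension keeps, for each value, its LAST index
theorem foldl_insert_enumerate_getD (v : Int) :
    ∀ (s : List Int) (k : Int) (d : PySem.Dict Int Int),
      ((PySem.List.enumerate s k).foldl (fun d p => d.insert p.2 p.1) d).getD v 0 =
        if v ∈ s then k + (lastIdxOf v s : Int) else d.getD v 0 := by
  intro s
  induction s with
  | nil => intro k d; simp [PySem.List.enumerate_nil]
  | cons x t ih =>
    intro k d
    rw [PySem.List.enumerate_cons]
    simp only [List.foldl_cons]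
    rw [ih (k + 1) (d.insert x k)]
    by_cases ht : v ∈ t
    · simp [ht, lastIdxOf]
      ring
    · by_cases hx : v = x
      · subst hx
        simp [ht, lastIdxOf, PySem.Dict.getD_insert_self]
      · simp [ht, hx, List.mem_cons]
        exact PySem.Dict.getD_insert_of_ne d k 0 hx

theorem bLast_getD {v : Int} {s : List Int} (h : v ∈ s) :
    (bLast s).getD v 0 = (lastIdxOf v s : Int) := by
  unfold bLast
  rw [foldl_insert_enumerate_getD v s 0 PySem.Dict.empty]
  simp [h]

theorem dropLast_take {s : List Int} {m : Nat} (h2 : m ≤ s.length) :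
    (s.take m).dropLast = s.take (m - 1) := by
  rw [List.dropLast_eq_take, List.take_take]
  congr 1
  simp [List.length_take]
  omega

theorem getLastD_take {s : List Int} {m : Nat} (h1 : 1 ≤ m) (h2 : m ≤ s.length) :
    (s.take m).getLastD 0 = s[m - 1]'(by omega) := by
  rw [List.getLastD_eq_getLast?, List.getLast?_eq_getElem?, List.length_take]
  have hmin : m ⊓ s.length = m := by omega
  rw [hmin, List.getElem?_take, if_pos (by omega), List.getElem?_eq_getElem (by omega)]
  simp

-- once the pop condition fails and the count condition is false, the inner loop is the identity
theorem aEat_freeze (num q : Int) (i : Nat) (remain : List Int) (e total : Int)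
    (hc : ¬((remain.length : Int) - 1 > (i : Int) ∧ remain.getLastD 0 < num))
    (hne : e + num ≠ q) :
    ∀ k, aEat num q i k (remain, e, total) = (remain, e, total) := by
  intro k
  induction k with
  | zero => rfl
  | succ k ih =>
    show aEat num q i (k + 1) (remain, e, total) = _
    rw [aEat]
    simp only [if_neg hc]
    have : (e + num == q) = false := by simpa using hne
    simp only [this, Bool.false_eq_true, if_false]
    exact ih

-- full characterisation of the inner loop on a tail-sorted prefix
theorem aEat_spec (s : List Int) (num q : Int) (i d : Nat)
    (hd : d < s.length) (hid : i ≤ d)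
    (hlt : ∀ e, (he : e < s.length) → d < e → s[e] < num)
    (heq : ∀ e, (he : e < s.length) → i ≤ e → e ≤ d → s[e] = num) :
    ∀ (k m : Nat) (e total : Int), m ≤ s.length → d + 1 ≤ m → e + num + k = q →
      aEat num q i k (s.take m, e, total) =
        if k ≤ m - (d + 1) then
          (s.take (m - k), e + k, total + (if 0 < k then 1 else 0))
        else (s.take (d + 1), e + ((m : Int) - (d : Int) - 1), total) := by
  intro k
  induction k with
  | zero =>
    intro m e total hm hdm _
    show (s.take m, e, total) = _
    rw [if_pos (by omega)]
    simp
  | succ k ih =>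
    intro m e total hm hdm hinv
    by_cases hc : d + 1 < m
    · -- pop succeeds
      have hcond : ((s.take m).length : Int) - 1 > (i : Int) ∧ (s.take m).getLastD 0 < num := by
        constructor
        · rw [List.length_take]; push_cast; omega
        · rw [getLastD_take (by omega) hm]
          exact hlt (m - 1) (by omega) (by omega)
      rw [aEat]
      simp only [if_pos hcond]
      rw [dropLast_take hm]
      have hcnt : (e + 1 + num == q) = (decide (k = 0)) := by
        by_cases hk : k = 0
        · subst hk; simp at hinv ⊢; omega
        · have : e + 1 + num ≠ q := by push_cast at hinv; omega
          simp [hk, this]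
      rw [hcnt]
      have hrec := ih (m - 1) (e + 1) (if (decide (k = 0)) = true then total + 1 else total)
        (by omega) (by omega) (by push_cast at hinv ⊢; omega)
      rw [hrec]
      by_cases hb : k + 1 ≤ m - (d + 1)
      · rw [if_pos (by omega), if_pos hb]
        have h1 : m - 1 - k = m - (k + 1) := by omega
        rw [h1]
        refine Prod.ext rfl (Prod.ext ?_ ?_)
        · push_cast; ring
        · by_cases hk : k = 0 <;> simp [hk]
      · rw [if_neg (by omega), if_neg hb]
        have hk : k ≠ 0 := by omega
        refine Prod.ext rfl (Prod.ext ?_ ?_)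
        · push_cast
          have : (1:Int) ≤ (m:Int) := by omega
          ring_nf
          omega
        · simp [hk]
    · -- m = d + 1 : pop fails for good
      have hm1 : m = d + 1 := by omega
      have hcond : ¬(((s.take m).length : Int) - 1 > (i : Int) ∧ (s.take m).getLastD 0 < num) := by
        rintro ⟨h1, h2⟩
        rw [List.length_take] at h1
        rw [getLastD_take (by omega) hm] at h2
        have hie : i ≤ m - 1 := by omega
        have := heq (m - 1) (by omega) hie (by omega)
        omega
      have hne : e + num ≠ q := by push_cast at hinv; omega
      rw [aEat]
      simp only [if_neg hcond]
      have : (e + num == q) = false := by simpa using hne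
      simp only [this, Bool.false_eq_true, if_false]
      rw [aEat_freeze num q i _ _ _ hcond hne k]
      rw [if_neg (by omega)]
      rw [hm1]
      refine Prod.ext rfl (Prod.ext ?_ rfl)
      push_cast
      ring

-- the per-query loops agree: A's remaining list is always a prefix s.take m and B's tail
-- pointer is j = m - 1
theorem idx_eq (s : List Int) (hs : List.Pairwise (· ≥ ·) s) (q : Int) :
    ∀ (fuel i m : Nat) (total : Int), s.length - i ≤ fuel → m ≤ s.length →
      aIdx s q i (s.take m) total = bIdx s q (bLast s) i ((m : Int) - 1) total := by
  intro fuel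
  induction fuel with
  | zero =>
    intro i m total hfuel hm
    have hi : ¬ i < s.length := by omega
    rw [aIdx, bIdx]
    simp [hi]
  | succ fuel ih =>
    intro i m total hfuel hm
    by_cases hi : i < s.length
    case neg => rw [aIdx, bIdx]; simp [hi]
    rw [aIdx, bIdx]
    simp only [dif_pos hi]
    set num := s[i] with hnum
    by_cases hq : q ≤ num
    · -- counted outright; inner loop runs 0 iterations
      simp only [if_pos hq]
      have h0 : (q - num).toNat = 0 := by omega
      rw [h0]
      show aIdx s q (i+1) (s.take m) (total+1) = _
      exact ih (i+1) m (total+1) (by omega) hm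
    · simp only [if_neg hq]
      have hpair : ∀ a b : Nat, (hab : a < b) → (hb : b < s.length) →
          s[b] ≤ s[a]'(Nat.lt_trans hab hb) := by
        intro a b hab hb
        exact List.pairwise_iff_getElem.mp hs a b (Nat.lt_trans hab hb) hb hab
      by_cases hbr1 : (m : Int) - 1 ≤ (i : Int)
      · -- both break on the length test
        have hA : ((s.take m).length : Int) - 1 ≤ (i : Int) := by
          rw [List.length_take]; push_cast; omega
        rw [if_pos (Or.inl hA), if_pos (Or.inl hbr1)]
      · have him : i + 1 < m := by omega
        have hAlen : ((s.take m).length : Int) - 1 = (m : Int) - 1 := by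
          rw [List.length_take]; push_cast; omega
        have hgetB : PySem.List.pyGetD s ((m : Int) - 1) 0 = s[m-1]'(by omega) := by
          have h9 : (m : Int) - 1 = ((m - 1 : Nat) : Int) := by omega
          rw [h9, PySem.List.pyGetD_natCast]
          exact List.getD_eq_getElem s 0 (by omega)
        have hgetA : (s.take m).getLastD 0 = s[m-1]'(by omega) := getLastD_take (by omega) hm
        by_cases hbr2 : s[m-1]'(by omega) = num
        · -- both break on the equal-tail test
          rw [if_pos (Or.inr (by rw [hgetA]; simpa using hbr2)),
              if_pos (Or.inr (by rw [hgetB]; simpa using hbr2))]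
        · -- no break: one eating round
          have hAne : ¬(((s.take m).length : Int) - 1 ≤ (i : Int) ∨ ((s.take m).getLastD 0 == num) = true) := by
            rintro (h | h)
            · rw [List.length_take] at h; omega
            · rw [hgetA] at h; exact hbr2 (by simpa using h)
          have hBne : ¬((m : Int) - 1 ≤ (i : Int) ∨ (PySem.List.pyGetD s ((m : Int) - 1) 0 == num) = true) := by
            rintro (h | h)
            · omega
            · rw [hgetB] at h; exact hbr2 (by simpa using h)
          rw [if_neg hAne, if_neg hBne]
          -- facts about d, the last index of num
          have hmem : num ∈ s := List.getElem_mem hi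
          set d := lastIdxOf num s with hdd
          have hdlt : d < s.length := lastIdxOf_lt_length hmem
          have hsd : s[d] = num := getElem_lastIdxOf hmem
          have hid : i ≤ d := by
            by_contra hcon
            exact getElem_ne_of_gt_lastIdxOf hi (show lastIdxOf num s < i by omega) hnum.symm
          have hlt : ∀ e, (he : e < s.length) → d < e → s[e] < num := by
            intro e he hde
            have h1 : s[e] ≤ s[d] := hpair d e hde he
            have h2 : s[e] ≠ num := getElem_ne_of_gt_lastIdxOf he hde
            omega
          have heq : ∀ e, (he : e < s.length) → i ≤ e → e ≤ d → s[e] = num := by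
            intro e he hie hed
            have h1 : s[e] ≤ num := by
              rcases Nat.lt_or_ge i e with h | h
              · exact hnum ▸ hpair i e h he
              · have : i = e := by omega
                simp [← this, ← hnum]
            have h2 : num ≤ s[e] := by
              rcases Nat.lt_or_ge e d with h | h
              · exact hsd ▸ hpair e d h hdlt
              · have : e = d := by omega
                simp [this, hsd]
            omega
          have hdm : d + 1 < m := by
            by_contra hcon
            have h1 : m - 1 ≤ d := by omega
            exact hbr2 (heq (m-1) (by omega) (by omega) h1)
          -- B's dict lookup is d
          have hlook : (bLast s).getD num 0 = (d : Int) := bLast_getD hmem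
          -- unroll A's inner loop
          have hspec := aEat_spec s num q i d hdlt hid hlt heq (q - num).toNat m 0 total hm
            (by omega) (by omega)
          rw [hspec, hlook]
          by_cases hb : (q - num).toNat ≤ m - (d + 1)
          · rw [if_pos hb]
            rw [if_pos (show 0 < (q - num).toNat by omega)]
            have heat : min (q - num) ((m : Int) - 1 - (d : Int)) = q - num := by omega
            rw [heat]
            simp only [BEq.rfl, if_true]
            have hj : (m : Int) - 1 - (q - num) = ((m - (q - num).toNat : Nat) : Int) - 1 := by
              omega
            rw [hj]
            exact ih (i+1) (m - (q - num).toNat) (total + 1) (by omega) (by omega)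
          · rw [if_neg hb]
            have heat : min (q - num) ((m : Int) - 1 - (d : Int)) = (m : Int) - 1 - (d : Int) := by
              omega
            rw [heat]
            have hne2 : (((m : Int) - 1 - (d : Int)) == (q - num)) = false := by
              simp only [beq_eq_false_iff_ne, ne_eq]
              omega
            rw [hne2]
            simp only [Bool.false_eq_true, if_false]
            have hj : (m : Int) - 1 - ((m : Int) - 1 - (d : Int)) = ((d + 1 : Nat) : Int) - 1 := by
              push_cast; omega
            rw [hj]
            exact ih (i+1) (d + 1) total (by omega) (by omega)

-- ===== VERDICT (by name: the statement is the Claim_ definition above) =====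
theorem evaluate_queries_spec : Claim_equal_evaluate_queries := by
  intro num_list queries_list _
  unfold Spec_evaluate_queries evaluate_queries evaluate_queries_alt
  simp only []
  apply List.map_congr_left
  intro q _
  set s := PySem.List.sorted num_list (fun x => x) true with hs
  have hpw : List.Pairwise (· ≥ ·) s := by
    have := PySem.List.sorted_pairwise_rev num_list (fun x => x)
    exact this.imp (fun h => h)
  have := idx_eq s hpw q s.length 0 s.length 0 (by omega) (by omega)
  rw [List.take_length] at this
  simpa using this
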